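-- pv_equiv track=rewrite | github.com/VishalSharmaCode/Leetcode-problem | findSmallestInteger.py | findSmallestInteger
-- ===== SOURCE A (Python) =====
-- from typing import List
--
-- def findSmallestInteger(nums: List[int], value: int) -> int:
--     from collections import Counter
--
--     # Normalize each number modulo value
--     count = Counter(((num % value) + value) % value for num in nums)
--     # Try to form numbers starting from 0 upwards
--     mex = 0
--     while count[mex % value] > 0:
--         count[mex % value] -= 1
--         mex += 1
--     return mex
-- ===== SOURCE B (Python) =====
-- from typing import List
--
-- def findSmallestInteger(nums: List[int], value: int) -> int:
--     from collections import Counter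
--     # remainder r can make exactly count[r] integers r, r+value, ...; the first gap
--     # it leaves is count[r]*value + r, and the MEX is the smallest of those gaps.
--     # The MEX is at most len(nums), so remainders beyond len(nums) can never win.
--     count = Counter(((num % value) + value) % value for num in nums)
--     return min(count[r] * value + r for r in range(min(value, len(nums) + 1)))
-- ===== Notes on version B (the rewrite author's own statement) =====
-- stated objective: alternative
-- what changed: Replaces the step-by-step consuming while-loop over a mutated Counter by a closed-form minimum: remainder r supports exactly count[r] integers r, r+value, ..., so its first gap is count[r]*value+r and the answer is the minimum of those gaps over the remainders that can win (r < min(value, len(nums)+1)).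
-- outside the precondition, e.g. on findSmallestInteger([0], -3): A returns 1, B raises ValueError; on findSmallestInteger([], 0): A raises ZeroDivisionError, B raises ValueError
import Mathlib
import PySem

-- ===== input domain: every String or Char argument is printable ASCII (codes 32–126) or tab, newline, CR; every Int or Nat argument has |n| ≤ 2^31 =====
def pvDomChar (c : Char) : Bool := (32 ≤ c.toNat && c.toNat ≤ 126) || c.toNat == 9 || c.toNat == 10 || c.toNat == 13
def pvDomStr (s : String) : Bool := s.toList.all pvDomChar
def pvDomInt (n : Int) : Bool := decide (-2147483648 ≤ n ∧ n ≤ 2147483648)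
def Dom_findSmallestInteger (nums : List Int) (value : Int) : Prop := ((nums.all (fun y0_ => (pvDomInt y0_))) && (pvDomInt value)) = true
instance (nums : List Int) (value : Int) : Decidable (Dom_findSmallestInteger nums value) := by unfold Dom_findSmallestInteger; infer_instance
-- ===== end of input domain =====

-- B replaces A's step-by-step consuming while-loop by a closed-form minimum over the
-- residue counts (min over r of count[r]*value + r); equivalence is proved for value ≥ 1.

-- ===== PORT A =====
-- A's while loop; each iteration decrements a positive count, so it runs at most
-- (sum of all counts) = nums.length times: fuel nums.length + 1 suffices (proved below).
def pvLoopA (value : Int) : Nat → PySem.Dict Int Int → Int → Int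
  | 0, _, mex => mex
  | fuel+1, count, mex =>
    if 0 < count.getD (PySem.Int.mod mex value) 0 then
      pvLoopA value fuel
        (count.insert (PySem.Int.mod mex value) (count.getD (PySem.Int.mod mex value) 0 - 1))
        (mex + 1)
    else mex

def findSmallestInteger (nums : List Int) (value : Int) : Int :=
  let count := PySem.Dict.counter
    (nums.map (fun num => PySem.Int.mod (PySem.Int.mod num value + value) value))
  pvLoopA value (nums.length + 1) count 0

-- ===== PORT B =====
def findSmallestInteger_alt (nums : List Int) (value : Int) : Int :=
  let count := PySem.Dict.counter
    (nums.map (fun num => PySem.Int.mod (PySem.Int.mod num value + value) value))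
  match PySem.List.min?
      ((PySem.List.pyRange 0 (min value ((nums.length : Int) + 1)) 1).map
        (fun r => count.getD r 0 * value + r))
      (fun x => x) with
  | some m => m
  | none => 0

-- ===== PRECONDITION & SPEC =====
-- Pre_ excludes value = 0, where A raises ZeroDivisionError, and value < 0, where B's
-- min over the empty range(value) raises ValueError although A returns a value.
def Pre_findSmallestInteger (nums : List Int) (value : Int) : Prop := 1 ≤ value
instance (nums : List Int) (value : Int) : Decidable (Pre_findSmallestInteger nums value) := by
  unfold Pre_findSmallestInteger; infer_instance

def pvWitness_findSmallestInteger : List Int × Int := ([0, 3, 1], 2)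

def Spec_findSmallestInteger (nums : List Int) (value : Int) (out : Int) : Prop :=
  out = findSmallestInteger_alt nums value
instance (nums : List Int) (value : Int) (out : Int) : Decidable (Spec_findSmallestInteger nums value out) := by
  unfold Spec_findSmallestInteger; infer_instance

-- ===== CLAIM (what is proved, stated in full; the proofs are below) =====
def Claim_equal_findSmallestInteger : Prop := ∀ (nums : List Int) (value : Int), Dom_findSmallestInteger nums value → Pre_findSmallestInteger nums value → Spec_findSmallestInteger nums value (findSmallestInteger nums value)

-- ===== LEMMAS AND PROOFS =====

lemma pv_emod_sub_one (a v : Int) (hv : 0 < v) :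
    (a - 1) % v = if a % v = 0 then v - 1 else a % v - 1 := by
  have hd := Int.mul_ediv_add_emod a v
  have h0 : 0 ≤ a % v := Int.emod_nonneg a (by omega)
  have h1 : a % v < v := Int.emod_lt_of_pos a hv
  split_ifs with h
  · have e : a - 1 = (v - 1) + v * (a / v - 1) := by
      have : v * (a / v - 1) = v * (a / v) - v := by ring
      omega
    rw [e, Int.add_mul_emod_self_left]
    exact Int.emod_eq_of_lt (by omega) (by omega)
  · have e : a - 1 = (a % v - 1) + v * (a / v) := by omega
    rw [e, Int.add_mul_emod_self_left]
    exact Int.emod_eq_of_lt (by omega) (by omega)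

lemma pv_emod_sub_self (mex v : Int) (_hv : 0 < v) : (mex % v - mex) % v = 0 := by
  have hd := Int.mul_ediv_add_emod mex v
  have e : mex % v - mex = 0 + v * (-(mex / v)) := by
    have : v * (-(mex / v)) = -(v * (mex / v)) := by ring
    omega
  rw [e, Int.add_mul_emod_self_left]
  simp

lemma pv_emod_sub_ne (r mex v : Int) (hv : 0 < v) (h0 : 0 ≤ r) (h1 : r < v)
    (hne : r ≠ mex % v) : (r - mex) % v ≠ 0 := by
  intro hcon
  have hd := Int.mul_ediv_add_emod mex v
  have hm0 : 0 ≤ mex % v := Int.emod_nonneg mex (by omega)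
  have hm1 : mex % v < v := Int.emod_lt_of_pos mex hv
  have e : r - mex = (r - mex % v) + v * (-(mex / v)) := by
    have : v * (-(mex / v)) = -(v * (mex / v)) := by ring
    omega
  rw [e, Int.add_mul_emod_self_left] at hcon
  rcases Int.lt_or_le (mex % v) r with hlt | hle
  · rw [Int.emod_eq_of_lt (by omega) (by omega)] at hcon; omega
  · have e2 : r - mex % v = (r - mex % v + v) + v * (-1) := by ring
    rw [e2, Int.add_mul_emod_self_left, Int.emod_eq_of_lt (by omega) (by omega)] at hcon
    omega

lemma pv_foldl_min_le (t : List Int) : ∀ (x y : Int), (y = x ∨ y ∈ t) → t.foldl min x ≤ y := by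
  induction t with
  | nil => intro x y hy; simp at hy; simp [hy]
  | cons a t ih =>
    intro x y hy
    simp only [List.foldl_cons]
    rcases hy with rfl | hy
    · exact le_trans (ih _ _ (Or.inl rfl)) (min_le_left _ _)
    · rcases List.mem_cons.mp hy with rfl | hy
      · exact le_trans (ih _ _ (Or.inl rfl)) (min_le_right _ _)
      · exact ih _ _ (Or.inr hy)

lemma pv_foldl_min_mem (t : List Int) : ∀ x : Int, t.foldl min x = x ∨ t.foldl min x ∈ t := by
  induction t with
  | nil => intro x; exact Or.inl rfl
  | cons a t ih =>
    intro x
    simp only [List.foldl_cons]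
    rcases ih (min x a) with h | h
    · rcases min_choice x a with hc | hc
      · exact Or.inl (h.trans hc)
      · exact Or.inr (List.mem_cons.mpr (Or.inl (h.trans hc)))
    · exact Or.inr (List.mem_cons.mpr (Or.inr h))

lemma pv_minlist_shift (l : List Int) (g h : Int → Int)
    (hgh : ∀ r ∈ l, g r = h r + 1) :
    ∀ x y : Int, x = y + 1 → (l.map g).foldl min x = (l.map h).foldl min y + 1 := by
  induction l with
  | nil => intro x y hxy; simpa using hxy
  | cons a l ih =>
    intro x y hxy
    simp only [List.map_cons, List.foldl_cons]
    have ha : g a = h a + 1 := hgh a (List.mem_cons_self)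
    refine ih (fun r hr => hgh r (List.mem_cons_of_mem _ hr)) _ _ ?_
    rw [hxy, ha, min_add_add_right]

def pvMinL (v : Int) (f : Int → Int) (mex : Int) : Int :=
  match (PySem.List.pyRange 0 v 1).map (fun r => f r * v + PySem.Int.mod (r - mex) v) with
  | [] => 0
  | x :: t => t.foldl min x

lemma pv_pyRange_cons (v : Int) (hv : 1 ≤ v) :
    PySem.List.pyRange 0 v 1 = 0 :: PySem.List.pyRange 1 v 1 := by
  rw [PySem.List.pyRange_one_cons (show (0:Int) < v by omega)]
  norm_num

lemma pvMinL_eq_foldl (v : Int) (hv : 1 ≤ v) (f : Int → Int) (mex : Int) :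
    pvMinL v f mex
      = ((PySem.List.pyRange 1 v 1).map (fun r => f r * v + PySem.Int.mod (r - mex) v)).foldl
          min (f 0 * v + PySem.Int.mod (0 - mex) v) := by
  unfold pvMinL
  rw [pv_pyRange_cons v hv, List.map_cons]

lemma pvMinL_le (v : Int) (hv : 1 ≤ v) (f : Int → Int) (mex r : Int)
    (hr : r ∈ PySem.List.pyRange 0 v 1) :
    pvMinL v f mex ≤ f r * v + PySem.Int.mod (r - mex) v := by
  rw [pvMinL_eq_foldl v hv]
  apply pv_foldl_min_le
  rw [pv_pyRange_cons v hv] at hr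
  rcases List.mem_cons.mp hr with rfl | hr
  · exact Or.inl rfl
  · exact Or.inr (List.mem_map_of_mem hr)

lemma pvMinL_mem_form (v : Int) (hv : 1 ≤ v) (f : Int → Int) (mex : Int) :
    ∃ r ∈ PySem.List.pyRange 0 v 1, pvMinL v f mex = f r * v + PySem.Int.mod (r - mex) v := by
  rw [pvMinL_eq_foldl v hv]
  rcases pv_foldl_min_mem
      ((PySem.List.pyRange 1 v 1).map (fun r => f r * v + PySem.Int.mod (r - mex) v))
      (f 0 * v + PySem.Int.mod (0 - mex) v) with h | h
  · exact ⟨0, by rw [PySem.List.mem_pyRange_one]; omega, h⟩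
  · rcases List.mem_map.mp h with ⟨r, hr, he⟩
    have hr' : r ∈ PySem.List.pyRange 0 v 1 := by
      rw [PySem.List.mem_pyRange_one]
      rw [PySem.List.mem_pyRange_one] at hr
      omega
    exact ⟨r, hr', he.symm⟩

lemma pvMinL_eq_zero (v : Int) (hv : 1 ≤ v) (f : Int → Int) (mex : Int)
    (hf : ∀ r, 0 ≤ f r) (h0 : f (PySem.Int.mod mex v) = 0) :
    pvMinL v f mex = 0 := by
  have hmod : ∀ a : Int, PySem.Int.mod a v = a % v := fun a =>
    PySem.Int.mod_eq_emod_of_pos (by omega)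
  apply le_antisymm
  · have hm : mex % v ∈ PySem.List.pyRange 0 v 1 := by
      rw [PySem.List.mem_pyRange_one]
      exact ⟨Int.emod_nonneg mex (by omega), Int.emod_lt_of_pos mex (by omega)⟩
    have hle := pvMinL_le v hv f mex (mex % v) hm
    rw [hmod] at h0
    rw [hmod, pv_emod_sub_self mex v (by omega), h0] at hle
    simpa using hle
  · rcases pvMinL_mem_form v hv f mex with ⟨r, hr, he⟩
    rw [he, hmod]
    have h1 := mul_nonneg (hf r) (show (0:Int) ≤ v by omega)
    have h2 := Int.emod_nonneg (r - mex) (show v ≠ 0 by omega)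
    omega

lemma pvMinL_shift (v : Int) (hv : 1 ≤ v) (f : Int → Int) (mex : Int) :
    pvMinL v f mex
      = pvMinL v (fun r => if r = PySem.Int.mod mex v then f (PySem.Int.mod mex v) - 1 else f r)
          (mex + 1) + 1 := by
  have hmod : ∀ a : Int, PySem.Int.mod a v = a % v := fun a =>
    PySem.Int.mod_eq_emod_of_pos (by omega)
  have hpt : ∀ r ∈ PySem.List.pyRange 0 v 1,
      f r * v + PySem.Int.mod (r - mex) v
        = ((if r = PySem.Int.mod mex v then f (PySem.Int.mod mex v) - 1 else f r) * v
            + PySem.Int.mod (r - (mex + 1)) v) + 1 := by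
    intro r hr
    rw [PySem.List.mem_pyRange_one] at hr
    simp only [hmod]
    have e1 : r - (mex + 1) = (r - mex) - 1 := by ring
    rw [e1, pv_emod_sub_one (r - mex) v (by omega)]
    by_cases hc : r = mex % v
    · rw [if_pos hc, hc, pv_emod_sub_self mex v (by omega), if_pos rfl]
      have : (f (mex % v) - 1) * v = f (mex % v) * v - v := by ring
      omega
    · rw [if_neg hc, if_neg (pv_emod_sub_ne r mex v (by omega) hr.1 hr.2 hc)]
      omega
  rw [pvMinL_eq_foldl v hv f mex, pvMinL_eq_foldl v hv _ (mex + 1)]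
  exact pv_minlist_shift (PySem.List.pyRange 1 v 1) _ _
    (fun r hr => hpt r (by rw [PySem.List.mem_pyRange_one] at hr ⊢; omega)) _ _
    (hpt 0 (by rw [PySem.List.mem_pyRange_one]; omega))

lemma pvMinL_le_sum (v : Int) (hv : 1 ≤ v) :
    ∀ (n : Nat) (f : Int → Int) (mex : Int),
      (∀ r, 0 ≤ f r) →
      (∑ r ∈ Finset.Ico (0 : ℤ) v, f r) = (n : Int) →
      pvMinL v f mex ≤ (n : Int) := by
  have hmem : ∀ mex : Int, PySem.Int.mod mex v ∈ Finset.Ico (0 : ℤ) v := by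
    intro mex
    rw [PySem.Int.mod_eq_emod_of_pos (by omega), Finset.mem_Ico]
    exact ⟨Int.emod_nonneg mex (by omega), Int.emod_lt_of_pos mex (by omega)⟩
  intro n
  induction n with
  | zero =>
    intro f mex hnn hsum
    have hz : f (PySem.Int.mod mex v) = 0 :=
      (Finset.sum_eq_zero_iff_of_nonneg (fun i _ => hnn i)).mp hsum _ (hmem mex)
    rw [pvMinL_eq_zero v hv f mex hnn hz]
    simp
  | succ n ih =>
    intro f mex hnn hsum
    by_cases hz : f (PySem.Int.mod mex v) = 0
    · rw [pvMinL_eq_zero v hv f mex hnn hz]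
      positivity
    · rw [pvMinL_shift v hv f mex]
      have hnn' : ∀ r : Int,
          0 ≤ if r = PySem.Int.mod mex v then f (PySem.Int.mod mex v) - 1 else f r := by
        intro r
        have h1 := hnn r
        have h2 := hnn (PySem.Int.mod mex v)
        split_ifs with h
        · omega
        · exact h1
      have hsum' : (∑ r ∈ Finset.Ico (0 : ℤ) v,
            if r = PySem.Int.mod mex v then f (PySem.Int.mod mex v) - 1 else f r)
          = (n : Int) := by
        have he : ∀ r ∈ Finset.Ico (0 : ℤ) v,
            (if r = PySem.Int.mod mex v then f (PySem.Int.mod mex v) - 1 else f r)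
              = f r - (if r = PySem.Int.mod mex v then 1 else 0) := by
          intro r _
          split_ifs with h
          · rw [h]
          · omega
        rw [Finset.sum_congr rfl he, Finset.sum_sub_distrib, hsum,
          Finset.sum_ite_eq' _ _ (fun _ => (1 : Int)), if_pos (hmem mex)]
        push_cast
        ring
      have := ih _ (mex + 1) hnn' hsum'
      push_cast
      omega

lemma pvLoopA_eq (v : Int) (hv : 1 ≤ v) :
    ∀ (n fuel : Nat) (c : PySem.Dict Int Int) (mex : Int),
      n < fuel →
      (∀ r, 0 ≤ c.getD r 0) →
      (∑ r ∈ Finset.Ico (0 : ℤ) v, c.getD r 0) = (n : Int) →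
      pvLoopA v fuel c mex = mex + pvMinL v (fun r => c.getD r 0) mex := by
  have hmod : ∀ a : Int, PySem.Int.mod a v = a % v := fun a =>
    PySem.Int.mod_eq_emod_of_pos (by omega)
  have hmem : ∀ mex : Int, PySem.Int.mod mex v ∈ Finset.Ico (0 : ℤ) v := by
    intro mex
    rw [hmod, Finset.mem_Ico]
    exact ⟨Int.emod_nonneg mex (by omega), Int.emod_lt_of_pos mex (by omega)⟩
  intro n
  induction n with
  | zero =>
    intro fuel c mex hfuel hnn hsum
    obtain ⟨fuel', rfl⟩ : ∃ k, fuel = k + 1 := ⟨fuel - 1, by omega⟩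
    have hz : c.getD (PySem.Int.mod mex v) 0 = 0 :=
      (Finset.sum_eq_zero_iff_of_nonneg (fun i _ => hnn i)).mp hsum _ (hmem mex)
    rw [pvMinL_eq_zero v hv _ mex hnn hz]
    simp [pvLoopA, hz]
  | succ n ih =>
    intro fuel c mex hfuel hnn hsum
    obtain ⟨fuel', rfl⟩ : ∃ k, fuel = k + 1 := ⟨fuel - 1, by omega⟩
    by_cases hpos : 0 < c.getD (PySem.Int.mod mex v) 0
    · have hstep : pvLoopA v (fuel' + 1) c mex
          = pvLoopA v fuel'
              (c.insert (PySem.Int.mod mex v) (c.getD (PySem.Int.mod mex v) 0 - 1)) (mex + 1) := by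
        simp [pvLoopA, hpos]
      set c' := c.insert (PySem.Int.mod mex v) (c.getD (PySem.Int.mod mex v) 0 - 1) with hc'
      have hgd : ∀ r : Int, c'.getD r 0
          = if r = PySem.Int.mod mex v then c.getD (PySem.Int.mod mex v) 0 - 1 else c.getD r 0 := by
        intro r
        rw [hc', PySem.Dict.getD_insert]
      have hnn' : ∀ r, 0 ≤ c'.getD r 0 := by
        intro r
        rw [hgd]
        split_ifs with h
        · omega
        · exact hnn r
      have hsum' : (∑ r ∈ Finset.Ico (0 : ℤ) v, c'.getD r 0) = (n : Int) := by
        have : (∑ r ∈ Finset.Ico (0 : ℤ) v, c'.getD r 0)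
            = (∑ r ∈ Finset.Ico (0 : ℤ) v, (c.getD r 0 - if r = PySem.Int.mod mex v then 1 else 0)) := by
          apply Finset.sum_congr rfl
          intro r _
          rw [hgd]
          split_ifs with h
          · rw [h]
          · omega
        rw [this, Finset.sum_sub_distrib, hsum, Finset.sum_ite_eq' _ _ (fun _ => (1 : Int)),
          if_pos (hmem mex)]
        push_cast
        ring
      rw [hstep, ih fuel' c' (mex + 1) (by omega) hnn' hsum']
      have hfun : (fun r => c'.getD r 0)
          = (fun r => if r = PySem.Int.mod mex v
              then (fun r => c.getD r 0) (PySem.Int.mod mex v) - 1 else (fun r => c.getD r 0) r) := by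
        funext r
        exact hgd r
      rw [hfun, pvMinL_shift v hv (fun r => c.getD r 0) mex]
      ring
    · have hz : c.getD (PySem.Int.mod mex v) 0 = 0 := le_antisymm (by omega) (hnn _)
      rw [pvMinL_eq_zero v hv _ mex hnn hz]
      simp [pvLoopA, hpos]

lemma pv_sum_count (v : Int) (_hv : 1 ≤ v) (l : List Int)
    (h : ∀ x ∈ l, 0 ≤ x ∧ x < v) :
    (∑ r ∈ Finset.Ico (0 : ℤ) v, (l.count r : Int)) = (l.length : Int) := by
  induction l with
  | nil => simp
  | cons a t ih =>
    have ha := h a List.mem_cons_self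
    have he : ∀ r : Int, ((a :: t).count r : Int)
        = (t.count r : Int) + (if a = r then 1 else 0) := by
      intro r
      rw [List.count_cons]
      push_cast
      simp [beq_iff_eq]
    simp only [he]
    rw [Finset.sum_add_distrib, ih (fun x hx => h x (List.mem_cons_of_mem _ hx)),
      Finset.sum_ite_eq _ a (fun _ => (1 : Int)), if_pos (Finset.mem_Ico.mpr ⟨ha.1, ha.2⟩)]
    push_cast [List.length_cons]
    ring

-- ===== VERDICT (by name: the statement is the Claim_ definition above) =====
theorem findSmallestInteger_spec : Claim_equal_findSmallestInteger := by
  intro nums value _hdom hpre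
  have hv : 1 ≤ value := hpre
  unfold Spec_findSmallestInteger
  have hmod : ∀ a : Int, PySem.Int.mod a value = a % value := fun a =>
    PySem.Int.mod_eq_emod_of_pos (by omega)
  simp only [findSmallestInteger, findSmallestInteger_alt]
  set keys := nums.map (fun num => PySem.Int.mod (PySem.Int.mod num value + value) value)
    with hkeys
  set c := PySem.Dict.counter keys with hc
  set g : Int → Int := fun r => c.getD r 0 * value + r with hg
  set t : Int := min value ((nums.length : Int) + 1) with ht
  have ht1 : 1 ≤ t := by rw [ht]; omega
  have ht2 : t ≤ value := by rw [ht]; omega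
  have hnn : ∀ r : Int, 0 ≤ c.getD r 0 := by
    intro r
    rw [hc, PySem.Dict.getD_counter]
    exact_mod_cast Nat.zero_le _
  have hrange : ∀ x ∈ keys, 0 ≤ x ∧ x < value := by
    intro x hx
    rcases List.mem_map.mp hx with ⟨num, _, rfl⟩
    rw [hmod]
    exact ⟨Int.emod_nonneg _ (by omega), Int.emod_lt_of_pos _ (by omega)⟩
  have hsum : (∑ r ∈ Finset.Ico (0 : ℤ) value, c.getD r 0) = (nums.length : Int) := by
    have he : ∀ r ∈ Finset.Ico (0 : ℤ) value, c.getD r 0 = (keys.count r : Int) := by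
      intro r _
      rw [hc, PySem.Dict.getD_counter]
    rw [Finset.sum_congr rfl he, pv_sum_count value hv keys hrange, hkeys,
      List.length_map]
  have hterm : ∀ r : Int, 0 ≤ r → r < value →
      c.getD r 0 * value + PySem.Int.mod (r - 0) value = g r := by
    intro r h0 h1
    rw [hg, hmod, sub_zero, Int.emod_eq_of_lt h0 h1]
  -- A side: the loop computes the minimum over all residues in [0, value)
  rw [pvLoopA_eq value hv nums.length (nums.length + 1) c 0 (by omega) hnn hsum]
  -- B side: reduce the min? over the truncated range to a fold
  rw [show (PySem.List.pyRange 0 t 1).map g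
      = g 0 :: (PySem.List.pyRange 1 t 1).map g by
    rw [pv_pyRange_cons t ht1, List.map_cons]]
  rw [PySem.List.min?_id_cons]
  set y := ((PySem.List.pyRange 1 t 1).map g).foldl min (g 0) with hy
  -- the truncated min y is g r for some r ∈ [0, t)
  obtain ⟨r, hr0, hr1, hyr⟩ : ∃ r : Int, 0 ≤ r ∧ r < t ∧ y = g r := by
    rcases pv_foldl_min_mem ((PySem.List.pyRange 1 t 1).map g) (g 0) with h | h
    · exact ⟨0, le_refl 0, by omega, h⟩
    · rcases List.mem_map.mp h with ⟨r, hr, he⟩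
      rw [PySem.List.mem_pyRange_one] at hr
      exact ⟨r, by omega, hr.2, he.symm⟩
  have hbound := pvMinL_le_sum value hv nums.length (fun r => c.getD r 0) 0 hnn hsum
  -- the full min is at most y
  have h1 : pvMinL value (fun r => c.getD r 0) 0 ≤ y := by
    have hm : r ∈ PySem.List.pyRange 0 value 1 := by
      rw [PySem.List.mem_pyRange_one]
      omega
    have := pvMinL_le value hv (fun r => c.getD r 0) 0 r hm
    rw [hterm r hr0 (by omega)] at this
    omega
  -- and y is at most the full min
  have h2 : y ≤ pvMinL value (fun r => c.getD r 0) 0 := by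
    obtain ⟨s, hs, hes⟩ := pvMinL_mem_form value hv (fun r => c.getD r 0) 0
    rw [PySem.List.mem_pyRange_one] at hs
    rw [hterm s hs.1 hs.2] at hes
    by_cases hst : s < t
    · rw [hes]
      apply pv_foldl_min_le
      rcases eq_or_lt_of_le hs.1 with h0 | h0
      · exact Or.inl (by rw [← h0])
      · refine Or.inr (List.mem_map_of_mem ?_)
        rw [PySem.List.mem_pyRange_one]
        omega
    · exfalso
      have hmn := mul_nonneg (hnn s) (show (0:Int) ≤ value by omega)
      have hgs : g s = c.getD s 0 * value + s := rfl
      omega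
  rw [zero_add]
  exact le_antisymm h1 h2
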